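-- pv_equiv track=rewrite | github.com/Wilson-Moore/Encryption-Algorithms | Classic/Substition/Playfair.py | readjust_message
-- ===== SOURCE A (Python) =====
-- def readjust_message(text):
--     i = 0
--     while i < len(text) - 2:
--         if text[i] == text[i + 2] and text[i + 1] == "x":
--             text = text[:i + 1] + text[i + 2:]
--         else:
--             i += 1
--
--     if text and text[-1] == "x":
--         text = text[:-1]
--
--     return text
-- ===== SOURCE B (Python) =====
-- def readjust_message(text):
--     out = []
--     for c in text:
--         if len(out) >= 2 and out[-1] == "x" and out[-2] == c:
--             out[-1] = c
--         else:
--             out.append(c)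
--     if out and out[-1] == "x":
--         out.pop()
--     return "".join(out)
-- ===== Notes on version B (the rewrite author's own statement) =====
-- stated objective: faster
-- what changed: Replaced the restarting while-loop that rebuilds the string by slicing on every deletion with a single left-to-right pass maintaining an output stack whose top 'x' is replaced when it sits between duplicate letters.
import Mathlib
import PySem

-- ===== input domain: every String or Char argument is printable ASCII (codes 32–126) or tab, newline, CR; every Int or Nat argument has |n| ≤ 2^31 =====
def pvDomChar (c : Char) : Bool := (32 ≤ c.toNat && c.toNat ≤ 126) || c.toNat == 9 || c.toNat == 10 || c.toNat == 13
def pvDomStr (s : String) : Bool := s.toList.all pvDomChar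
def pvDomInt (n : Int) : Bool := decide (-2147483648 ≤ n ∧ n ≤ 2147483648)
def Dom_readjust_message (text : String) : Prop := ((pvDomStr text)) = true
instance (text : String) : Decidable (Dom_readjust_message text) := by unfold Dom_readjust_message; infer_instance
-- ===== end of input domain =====

-- B replaces A's slice-and-restart while-loop by one left-to-right pass over an output stack.

-- ===== PORT A =====
-- A's while-loop: each iteration either deletes text[i+1] (by slicing, indices here
-- are in range since i < len - 2) or advances i, so (length - i) decreases by exactly
-- one each iteration; `fuel` is initialised to that measure (a totality guard only).
def pvLoopA (fuel : Nat) (t : List Char) (i : Nat) : List Char :=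
  match fuel with
  | 0 => t
  | fuel + 1 =>
    if i < t.length - 2 then
      if t.getD i ' ' = t.getD (i+2) ' ' ∧ t.getD (i+1) ' ' = 'x' then
        pvLoopA fuel (t.take (i+1) ++ t.drop (i+2)) i
      else
        pvLoopA fuel t (i+1)
    else t

-- python: if text and text[-1] == "x": text = text[:-1]
def pvStripA (t : List Char) : List Char :=
  if t ≠ [] ∧ t.getLast? = some 'x' then t.dropLast else t

def readjust_message (text : String) : String :=
  String.mk (pvStripA (pvLoopA text.toList.length text.toList 0))

-- ===== PORT B =====
-- Source B's single pass; the stack `out` is kept in reversed order (top = head) so that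
-- Source B's out[-1]/out[-2]/append/out[-1]=c are O(1) head operations.
def pvLoopB (out : List Char) (cs : List Char) : List Char :=
  match cs, out with
  | [], _ => out
  | c :: rest, a :: b :: tl =>
    -- len(out) >= 2: pop/replace the top 'x' when it sits between duplicates
    pvLoopB (if a = 'x' ∧ b = c then c :: b :: tl else c :: a :: b :: tl) rest
  | c :: rest, [a] => pvLoopB (c :: [a]) rest
  | c :: rest, [] => pvLoopB [c] rest

-- python: if out and out[-1] == "x": out.pop()
def pvStripB (out : List Char) : List Char :=
  if out ≠ [] ∧ out.head? = some 'x' then out.tail else out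

def readjust_message_alt (text : String) : String :=
  String.mk (pvStripB (pvLoopB [] text.toList)).reverse

-- ===== PRECONDITION & SPEC =====
def Spec_readjust_message (text : String) (out : String) : Prop := out = readjust_message_alt text
instance (text : String) (out : String) : Decidable (Spec_readjust_message text out) := by unfold Spec_readjust_message; infer_instance

-- ===== CLAIM (what is proved, stated in full; the proofs are below) =====
def Claim_equal_readjust_message : Prop := ∀ (text : String), Dom_readjust_message text → Spec_readjust_message text (readjust_message text)

-- ===== LEMMAS AND PROOFS =====

-- Correspondence of the two loops: A at index i = |s| - 2 over s ++ r equals B's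
-- stack run with stack s.reverse and remaining input r.
theorem pvLoop_corr (r : List Char) : ∀ (s : List Char), 2 ≤ s.length →
    pvLoopA (r.length + 2) (s ++ r) (s.length - 2) = (pvLoopB s.reverse r).reverse := by
  induction r with
  | nil =>
    intro s hs
    rw [pvLoopA, pvLoopB]
    simp
  | cons c rest ih =>
    intro s hs
    rw [show (c :: rest).length + 2 = (rest.length + 2) + 1 by simp]
    obtain ⟨s', a, b, rfl⟩ : ∃ s' a b, s = s' ++ [b, a] := by
      rcases List.eq_nil_or_concat s with h | ⟨s1, a, h1⟩
      · subst h; simp at hs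
      rcases List.eq_nil_or_concat s1 with h2 | ⟨s2, b, h2⟩
      · subst h1; subst h2; simp at hs
      · exact ⟨s2, a, b, by subst h1; subst h2; simp⟩
    have hL : (s' ++ [b, a]).length = s'.length + 2 := by simp
    rw [pvLoopA, hL]
    simp only [Nat.add_sub_cancel]
    have hlen : s'.length < ((s' ++ [b, a]) ++ c :: rest).length - 2 := by simp; omega
    rw [if_pos hlen, List.append_assoc]
    have g0 : (s' ++ ([b, a] ++ c :: rest)).getD s'.length ' ' = b := by
      rw [List.getD_append_right _ _ _ _ le_rfl]; simp
    have g1 : (s' ++ ([b, a] ++ c :: rest)).getD (s'.length + 1) ' ' = a := by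
      rw [List.getD_append_right _ _ _ _ (by omega)]; simp
    have g2 : (s' ++ ([b, a] ++ c :: rest)).getD (s'.length + 2) ' ' = c := by
      rw [List.getD_append_right _ _ _ _ (by omega)]; simp
    rw [g0, g2, g1]
    have hrev : (s' ++ [b, a]).reverse = a :: b :: s'.reverse := by simp
    rw [hrev, pvLoopB]
    by_cases hc : b = c ∧ a = 'x'
    · rw [if_pos hc, if_pos ⟨hc.2, hc.1⟩]
      have e : List.take (s'.length + 1) (s' ++ ([b, a] ++ c :: rest)) ++
          List.drop (s'.length + 2) (s' ++ ([b, a] ++ c :: rest)) = (s' ++ [b, c]) ++ rest := by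
        simp [List.take_append, List.drop_append,
          List.take_of_length_le (le_of_lt (Nat.lt_succ_self _)),
          List.drop_eq_nil_of_le]
      rw [e]
      have h2 := ih (s' ++ [b, c]) (by simp)
      simp only [List.length_append, List.length_cons, List.length_nil,
        List.reverse_append, List.reverse_cons, List.reverse_nil,
        List.nil_append, List.cons_append] at h2
      rw [show s'.length + (0 + 1 + 1) - 2 = s'.length by omega] at h2
      exact h2
    · have hc' : ¬ (a = 'x' ∧ b = c) := fun ⟨h1, h2⟩ => hc ⟨h2, h1⟩
      rw [if_neg hc, if_neg hc']
      have e : s' ++ ([b, a] ++ c :: rest) = ((s' ++ [b, a]) ++ [c]) ++ rest := by simp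
      rw [e]
      have h2 := ih ((s' ++ [b, a]) ++ [c]) (by simp)
      simp only [List.length_append, List.length_cons, List.length_nil,
        List.reverse_append, List.reverse_cons, List.reverse_nil,
        List.nil_append, List.cons_append] at h2
      rw [show s'.length + (0 + 1 + 1) + (0 + 1) - 2 = s'.length + 1 by omega] at h2
      exact h2

-- From index 0 on the whole string: the main loops agree.
theorem pvLoop_main (t : List Char) : pvLoopA t.length t 0 = (pvLoopB [] t).reverse := by
  rcases t with _ | ⟨c1, t⟩
  · simp [pvLoopA, pvLoopB]
  rcases t with _ | ⟨c2, r⟩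
  · simp [pvLoopA, pvLoopB]
  rw [show (c1 :: c2 :: r).length = r.length + 2 by simp]
  have h := pvLoop_corr r [c1, c2] (by simp)
  simp only [List.length_cons, List.length_nil, List.cons_append, List.nil_append] at h
  rw [show (0:Nat) + 1 + 1 - 2 = 0 by omega] at h
  rw [show [c1, c2].reverse = [c2, c1] from rfl] at h
  rw [h, pvLoopB, pvLoopB]

-- The two final trailing-'x' strips agree through reversal.
theorem pvStrip_corr (l : List Char) : pvStripA l.reverse = (pvStripB l).reverse := by
  unfold pvStripA pvStripB
  by_cases hnil : l = []
  · subst hnil; simp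
  · have hrn : l.reverse ≠ [] := by simpa using hnil
    by_cases hx : l.head? = some 'x'
    · rw [if_pos ⟨hrn, by rw [List.getLast?_reverse, hx]⟩, if_pos ⟨hnil, hx⟩,
        List.dropLast_reverse]
    · rw [if_neg (by rw [List.getLast?_reverse]; tauto), if_neg (by tauto)]

theorem readjust_equal (text : String) :
    readjust_message text = readjust_message_alt text := by
  unfold readjust_message readjust_message_alt
  rw [pvLoop_main, pvStrip_corr]

-- ===== VERDICT (by name: the statement is the Claim_ definition above) =====
theorem readjust_message_spec : Claim_equal_readjust_message := by
  intro text _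
  unfold Spec_readjust_message
  exact readjust_equal text
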